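-- pv_equiv track=rewrite | github.com/Boole-Highland-Insight/ClawHarness | scripts/export_pair_report.py | safe_slug
-- ===== SOURCE A (Python) =====
-- def safe_slug(value: str) -> str:
--     chars: list[str] = []
--     for ch in value.lower():
--         if ch.isalnum():
--             chars.append(ch)
--         elif chars and chars[-1] != "-":
--             chars.append("-")
--     return "".join(chars).strip("-")
-- ===== SOURCE B (Python) =====
-- from itertools import groupby
--
-- def safe_slug(value: str) -> str:
--     return "-".join(
--         "".join(g) for k, g in groupby(value.lower(), key=str.isalnum) if k
--     )
-- ===== Notes on version B (the rewrite author's own statement) =====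
-- stated objective: idiomatic
-- what changed: Replaced the char-by-char scan with sentinel tracking (append char / conditional dash / final strip) by partitioning the lowercased string into maximal runs with itertools.groupby keyed on str.isalnum and hyphen-joining the alnum runs.
import Mathlib
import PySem

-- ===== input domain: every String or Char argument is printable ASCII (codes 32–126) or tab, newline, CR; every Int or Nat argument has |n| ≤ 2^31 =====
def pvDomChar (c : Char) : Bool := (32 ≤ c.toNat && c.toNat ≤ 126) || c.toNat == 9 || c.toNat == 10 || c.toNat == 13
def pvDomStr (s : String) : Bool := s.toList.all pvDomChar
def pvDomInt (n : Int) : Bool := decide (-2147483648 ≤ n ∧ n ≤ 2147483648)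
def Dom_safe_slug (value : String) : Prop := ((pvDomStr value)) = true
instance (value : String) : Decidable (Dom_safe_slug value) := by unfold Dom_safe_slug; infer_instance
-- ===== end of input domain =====

-- B replaces A's char-by-char scan with sentinel tracking by a groupby-style
-- run partition of the lowercased string followed by a join of the alnum runs
-- (objective: idiomatic; same O(n) cost).

-- ===== PORT A =====
-- A's loop body: append ch if alnum, else append a dash unless the list is empty or already ends in a dash
def stepA (acc : List Char) (ch : Char) : List Char :=
  if PySem.Chars.isalnum ch then acc ++ [ch]
  else if acc ≠ [] ∧ acc.getLast? ≠ some '-' then acc ++ ['-']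
  else acc

def safe_slug (value : String) : String :=
  let chars : List Char := (PySem.Str.lower value).toList.foldl stepA []
  PySem.Str.stripChars (String.ofList chars) "-"

-- ===== PORT B =====
-- itertools.groupby with a Bool key: maximal runs tagged with the key value
def pyGroupby (cs : List Char) : List (Bool × List Char) :=
  match cs with
  | [] => []
  | c :: rest =>
    match pyGroupby rest with
    | (k, g) :: gs =>
      if PySem.Chars.isalnum c = k then (k, c :: g) :: gs
      else (PySem.Chars.isalnum c, [c]) :: (k, g) :: gs
    | [] => [(PySem.Chars.isalnum c, [c])]

def safe_slug_alt (value : String) : String :=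
  String.ofList (PySem.Chars.join ['-']
    (((pyGroupby (PySem.Str.lower value).toList).filter (fun kg => kg.1)).map (fun kg => kg.2)))

-- ===== PRECONDITION & SPEC =====
def Spec_safe_slug (value : String) (out : String) : Prop := out = safe_slug_alt value
instance (value : String) (out : String) : Decidable (Spec_safe_slug value out) := by unfold Spec_safe_slug; infer_instance

-- ===== CLAIM (what is proved, stated in full; the proofs are below) =====
def Claim_equal_safe_slug : Prop := ∀ (value : String), Dom_safe_slug value → Spec_safe_slug value (safe_slug value)

-- ===== LEMMAS AND PROOFS =====

-- the alnum-keyed groups of pyGroupby, as A's state machine will emit them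
def partsOf (cs : List Char) : List (List Char) :=
  ((pyGroupby cs).filter (fun kg => kg.1)).map (fun kg => kg.2)

def Jn (cs : List Char) : List Char := PySem.Chars.join ['-'] (partsOf cs)

-- A's fold, as a pure tail function of the two observable facts about acc:
-- e = "acc is empty", d = "acc ends in a dash"
def tailF : Bool → Bool → List Char → List Char
  | _, _, [] => []
  | e, d, c :: cs =>
    if PySem.Chars.isalnum c then c :: tailF false (c == '-') cs
    else if e = false ∧ d = false then '-' :: tailF false true cs
    else tailF e d cs

def Sf (cs : List Char) : List Char := tailF true false cs
def Ef (cs : List Char) : List Char := tailF false false cs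

def lastNA (cs : List Char) : Bool :=
  match cs.getLast? with
  | some c => !(PySem.Chars.isalnum c)
  | none => false

def padS (cs : List Char) : List Char :=
  if partsOf cs = [] then [] else if lastNA cs then ['-'] else []

def headDash (cs : List Char) : List Char :=
  match cs with
  | [] => []
  | c :: _ => if PySem.Chars.isalnum c then [] else ['-']

theorem alnum_ne_dash (c : Char) (h : PySem.Chars.isalnum c = true) : (c == '-') = false := by
  cases hc : c == '-'
  · rfl
  · rw [beq_iff_eq] at hc; subst hc; exact absurd h (by decide)

theorem foldl_eq_tailF (cs : List Char) : ∀ acc : List Char,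
    cs.foldl stepA acc = acc ++ tailF acc.isEmpty (acc.getLast? == some '-') cs := by
  induction cs with
  | nil => intro acc; simp [tailF]
  | cons c cs ih =>
    intro acc
    rw [List.foldl_cons]
    by_cases hc : PySem.Chars.isalnum c = true
    · have hstep : stepA acc c = acc ++ [c] := by
        rw [stepA, if_pos hc]
      have h1 : (acc ++ [c]).isEmpty = false := by simp
      rw [hstep, ih (acc ++ [c]), List.getLast?_concat, h1]
      simp [tailF, hc, List.append_assoc]
    · rw [Bool.not_eq_true] at hc
      by_cases hcond : acc ≠ [] ∧ acc.getLast? ≠ some '-'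
      · have hstep : stepA acc c = acc ++ ['-'] := by
          rw [stepA, if_neg (by simp [hc]), if_pos hcond]
        have he : acc.isEmpty = false := by
          cases acc with
          | nil => exact absurd rfl hcond.1
          | cons a l => rfl
        have hd : (acc.getLast? == some '-') = false := by
          rw [beq_eq_false_iff_ne]; exact hcond.2
        have h1 : (acc ++ ['-']).isEmpty = false := by simp
        rw [hstep, ih (acc ++ ['-']), List.getLast?_concat, h1]
        simp [tailF, hc, he, hd, List.append_assoc]
      · have hskip : ¬ (acc.isEmpty = false ∧ (acc.getLast? == some '-') = false) := by
          intro ⟨he, hd⟩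
          apply hcond
          constructor
          · intro hnil; subst hnil; simp at he
          · rw [beq_eq_false_iff_ne] at hd; exact hd
        have hstep : stepA acc c = acc := by
          rw [stepA, if_neg (by simp [hc]), if_neg hcond]
        rw [hstep, ih acc]
        congr 1
        conv_rhs => rw [tailF]
        rw [if_neg (by simp [hc]), if_neg hskip]

theorem tailF_state (cs : List Char) : tailF true false cs = tailF false true cs := by
  induction cs with
  | nil => rfl
  | cons c cs ih =>
    by_cases hc : PySem.Chars.isalnum c = true
    · simp [tailF, hc]
    · rw [Bool.not_eq_true] at hc
      simp [tailF, hc, ih]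

theorem Sf_cons (c : Char) (cs : List Char) :
    Sf (c :: cs) = if PySem.Chars.isalnum c then c :: Ef cs else Sf cs := by
  by_cases hc : PySem.Chars.isalnum c = true
  · simp [Sf, Ef, tailF, hc, alnum_ne_dash c hc]
  · rw [Bool.not_eq_true] at hc
    simp [Sf, tailF, hc]

theorem Ef_cons (c : Char) (cs : List Char) :
    Ef (c :: cs) = if PySem.Chars.isalnum c then c :: Ef cs else '-' :: Sf cs := by
  by_cases hc : PySem.Chars.isalnum c = true
  · simp [Ef, tailF, hc, alnum_ne_dash c hc]
  · rw [Bool.not_eq_true] at hc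
    simp [Ef, Sf, tailF, hc, tailF_state]

theorem gb_cons_nil {cs : List Char} (c : Char) (h : pyGroupby cs = []) :
    pyGroupby (c :: cs) = [(PySem.Chars.isalnum c, [c])] := by
  rw [pyGroupby, h]

theorem gb_cons_cons {cs : List Char} (c : Char) {k : Bool} {g : List Char}
    {gs : List (Bool × List Char)} (h : pyGroupby cs = (k, g) :: gs) :
    pyGroupby (c :: cs) =
      if PySem.Chars.isalnum c = k then (k, c :: g) :: gs
      else (PySem.Chars.isalnum c, [c]) :: (k, g) :: gs := by
  rw [pyGroupby, h]

theorem gb_groups (cs : List Char) :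
    ∀ kg ∈ pyGroupby cs, kg.2 ≠ [] ∧ ∀ x ∈ kg.2, PySem.Chars.isalnum x = kg.1 := by
  induction cs with
  | nil => intro kg h; simp [pyGroupby] at h
  | cons c cs ih =>
    intro kg hkg
    cases hgb : pyGroupby cs with
    | nil =>
      rw [gb_cons_nil c hgb] at hkg
      simp at hkg
      subst hkg
      exact ⟨by simp, by intro x hx; simp at hx; subst hx; rfl⟩
    | cons p gs =>
      obtain ⟨k, g⟩ := p
      rw [gb_cons_cons c hgb] at hkg
      by_cases hk : PySem.Chars.isalnum c = k
      · rw [if_pos hk] at hkg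
        rcases List.mem_cons.mp hkg with h | h
        · subst h
          refine ⟨by simp, ?_⟩
          intro x hx
          rcases List.mem_cons.mp hx with h | h
          · subst h; exact hk
          · exact (ih (k, g) (by rw [hgb]; exact List.mem_cons_self)).2 x h
        · exact ih kg (by rw [hgb]; exact List.mem_cons_of_mem _ h)
      · rw [if_neg hk] at hkg
        rcases List.mem_cons.mp hkg with h | h
        · subst h
          exact ⟨by simp, by intro x hx; simp at hx; subst hx; rfl⟩
        · exact ih kg (by rw [hgb]; exact h)

theorem gbHead (c : Char) (cs : List Char) :
    ∃ t gs, pyGroupby (c :: cs) = (PySem.Chars.isalnum c, c :: t) :: gs := by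
  cases hgb : pyGroupby cs with
  | nil => exact ⟨[], [], gb_cons_nil c hgb⟩
  | cons p gs =>
    obtain ⟨k, g⟩ := p
    by_cases hk : PySem.Chars.isalnum c = k
    · subst hk; exact ⟨g, gs, by rw [gb_cons_cons c hgb]; simp⟩
    · exact ⟨[], (k, g) :: gs, by rw [gb_cons_cons c hgb]; simp [hk]⟩

theorem parts_cons_neg {c : Char} (h : PySem.Chars.isalnum c = false) (cs : List Char) :
    partsOf (c :: cs) = partsOf cs := by
  unfold partsOf
  cases hgb : pyGroupby cs with
  | nil => rw [gb_cons_nil c hgb]; simp [h]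
  | cons p gs =>
    obtain ⟨k, g⟩ := p
    rw [gb_cons_cons c hgb]
    by_cases hk : PySem.Chars.isalnum c = k
    · rw [if_pos hk, ← hk, h]
      simp
    · rw [if_neg hk]
      simp [h]

theorem parts_pos_pos {c d : Char} (hc : PySem.Chars.isalnum c = true)
    (hd : PySem.Chars.isalnum d = true) (cs : List Char) :
    ∃ p ps, partsOf (d :: cs) = p :: ps ∧ partsOf (c :: d :: cs) = (c :: p) :: ps := by
  obtain ⟨t, gs, hgb⟩ := gbHead d cs
  rw [hd] at hgb
  refine ⟨d :: t, (gs.filter (fun kg => kg.1)).map (fun kg => kg.2), ?_, ?_⟩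
  · unfold partsOf; rw [hgb]; simp
  · unfold partsOf
    rw [gb_cons_cons c hgb, if_pos (by rw [hc])]
    simp

theorem parts_pos_neg {c d : Char} (hc : PySem.Chars.isalnum c = true)
    (hd : PySem.Chars.isalnum d = false) (cs : List Char) :
    partsOf (c :: d :: cs) = [c] :: partsOf (d :: cs) := by
  obtain ⟨t, gs, hgb⟩ := gbHead d cs
  rw [hd] at hgb
  unfold partsOf
  rw [gb_cons_cons c hgb, if_neg (by rw [hc]; simp), hgb]
  simp [hc]

theorem parts_pos_ne {c : Char} (hc : PySem.Chars.isalnum c = true) (cs : List Char) :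
    partsOf (c :: cs) ≠ [] := by
  obtain ⟨t, gs, hgb⟩ := gbHead c cs
  rw [hc] at hgb
  unfold partsOf
  rw [hgb]
  simp

theorem parts_nil_all {cs : List Char} (h : partsOf cs = []) :
    ∀ x ∈ cs, PySem.Chars.isalnum x = false := by
  induction cs with
  | nil => intro x hx; simp at hx
  | cons c cs ih =>
    intro x hx
    by_cases hc : PySem.Chars.isalnum c = true
    · exact absurd h (parts_pos_ne hc cs)
    · rw [Bool.not_eq_true] at hc
      rw [parts_cons_neg hc] at h
      rcases List.mem_cons.mp hx with h' | h'
      · subst h'; exact hc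
      · exact ih h x h'

theorem join_cons_head (s : List Char) (c : Char) (p : List Char) (ps : List (List Char)) :
    PySem.Chars.join s ((c :: p) :: ps) = c :: PySem.Chars.join s (p :: ps) := by
  cases ps with
  | nil => simp [PySem.Chars.join_singleton]
  | cons q rest => simp [PySem.Chars.join_cons_cons]

theorem lastNA_cons_cons (c d : Char) (cs : List Char) :
    lastNA (c :: d :: cs) = lastNA (d :: cs) := by
  unfold lastNA
  rw [List.getLast?_cons_cons]

-- The joint state-machine characterisation: A's fold output is B's joined
-- runs, plus one trailing dash exactly when the string has an alnum char
-- followed later by a non-alnum char (padS); Ef carries a possible leading dash.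
theorem mainInv (cs : List Char) :
    Sf cs = Jn cs ++ padS cs ∧ Ef cs = headDash cs ++ Jn cs ++ padS cs := by
  induction cs with
  | nil =>
    constructor <;> simp [Sf, Ef, tailF, Jn, partsOf, pyGroupby, padS, headDash,
      PySem.Chars.join_nil]
  | cons c cs ih =>
    obtain ⟨ihS, ihE⟩ := ih
    by_cases hc : PySem.Chars.isalnum c = true
    · -- common goal: c :: Ef cs = Jn (c :: cs) ++ padS (c :: cs)
      have key : c :: Ef cs = Jn (c :: cs) ++ padS (c :: cs) := by
        cases cs with
        | nil =>
          have h1 : partsOf [c] = [[c]] := by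
            unfold partsOf; simp [pyGroupby, hc]
          simp [Ef, tailF, Jn, h1, PySem.Chars.join_singleton, padS, lastNA, hc]
        | cons d cs' =>
          rw [ihE]
          by_cases hd : PySem.Chars.isalnum d = true
          · obtain ⟨p, ps, hp1, hp2⟩ := parts_pos_pos hc hd cs'
            have hJ : Jn (c :: d :: cs') = c :: Jn (d :: cs') := by
              unfold Jn
              rw [hp1, hp2, join_cons_head]
            have hpad : padS (c :: d :: cs') = padS (d :: cs') := by
              unfold padS
              rw [hp1, hp2, lastNA_cons_cons]
              simp
            rw [hJ, hpad, headDash, if_pos hd]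
            simp
          · rw [Bool.not_eq_true] at hd
            have hps := parts_pos_neg hc hd cs'
            rcases hq : partsOf (d :: cs') with _ | ⟨p, ps⟩
            · have hJcs : Jn (d :: cs') = [] := by
                unfold Jn; rw [hq, PySem.Chars.join_nil]
              have hpadcs : padS (d :: cs') = [] := by
                unfold padS; rw [hq]; simp
              have hJ : Jn (c :: d :: cs') = [c] := by
                unfold Jn; rw [hps, hq, PySem.Chars.join_singleton]
              have hlast : lastNA (d :: cs') = true := by
                unfold lastNA
                have hne : (d :: cs') ≠ [] := by simp
                rw [List.getLast?_eq_some_getLast hne]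
                have := parts_nil_all hq ((d :: cs').getLast hne) (List.getLast_mem hne)
                simp [this]
              have hpad : padS (c :: d :: cs') = ['-'] := by
                unfold padS
                rw [hps, hq, lastNA_cons_cons, hlast]
                simp
              rw [hJ, hpad, hJcs, hpadcs, headDash, if_neg (by simp [hd])]
              simp
            · have hJ : Jn (c :: d :: cs') = c :: '-' :: Jn (d :: cs') := by
                unfold Jn
                rw [hps, hq, PySem.Chars.join_cons_cons]
                simp
              have hpad : padS (c :: d :: cs') = padS (d :: cs') := by
                unfold padS
                rw [hps, hq, lastNA_cons_cons]
                simp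
              rw [hJ, hpad, headDash, if_neg (by simp [hd])]
              simp
      constructor
      · rw [Sf_cons, if_pos hc]; exact key
      · rw [Ef_cons, if_pos hc, headDash, if_pos hc]
        simpa using key
    · rw [Bool.not_eq_true] at hc
      have hJ : Jn (c :: cs) = Jn cs := by unfold Jn; rw [parts_cons_neg hc]
      have hpad : padS (c :: cs) = padS cs := by
        cases cs with
        | nil =>
          unfold padS
          rw [parts_cons_neg hc]
          simp [partsOf, pyGroupby]
        | cons d cs' =>
          unfold padS
          rw [parts_cons_neg hc, lastNA_cons_cons]
      constructor
      · rw [Sf_cons, if_neg (by simp [hc]), ihS, hJ, hpad]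
      · rw [Ef_cons, if_neg (by simp [hc]), ihS, hJ, hpad, headDash, if_neg (by simp [hc])]
        simp

theorem parts_good (cs : List Char) :
    ∀ p ∈ partsOf cs, p ≠ [] ∧ ∀ x ∈ p, PySem.Chars.isalnum x = true := by
  intro p hp
  unfold partsOf at hp
  simp only [List.mem_map, List.mem_filter] at hp
  obtain ⟨kg, ⟨hmem, hkey⟩, heq⟩ := hp
  obtain ⟨hne, hall⟩ := gb_groups cs kg hmem
  subst heq
  exact ⟨hne, fun x hx => by rw [hall x hx, hkey]⟩

theorem join_last {ps : List (List Char)}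
    (h : ∀ p ∈ ps, p ≠ [] ∧ ∀ x ∈ p, PySem.Chars.isalnum x = true) (hne : ps ≠ []) :
    ∃ c, (PySem.Chars.join ['-'] ps).getLast? = some c ∧ PySem.Chars.isalnum c = true := by
  induction ps with
  | nil => exact absurd rfl hne
  | cons p rest ih =>
    cases rest with
    | nil =>
      obtain ⟨hpne, hall⟩ := h p List.mem_cons_self
      rw [PySem.Chars.join_singleton]
      refine ⟨p.getLast hpne, List.getLast?_eq_some_getLast hpne, ?_⟩
      exact hall _ (List.getLast_mem hpne)
    | cons q rest' =>
      obtain ⟨c, hc1, hc2⟩ := ih (fun p hp => h p (List.mem_cons_of_mem _ hp)) (by simp)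
      refine ⟨c, ?_, hc2⟩
      rw [PySem.Chars.join_cons_cons, List.getLast?_append, List.getLast?_append, hc1]
      rfl

theorem dash_contains (c : Char) : (['-'].contains c) = (c == '-') := by
  by_cases h : c = '-' <;> simp [h]

theorem strip_final (cs : List Char) :
    PySem.Chars.stripChars (Sf cs) ['-'] = Jn cs := by
  rw [(mainInv cs).1]
  rcases hq : partsOf cs with _ | ⟨p, ps⟩
  · have hJ : Jn cs = [] := by unfold Jn; rw [hq, PySem.Chars.join_nil]
    have hpad : padS cs = [] := by unfold padS; rw [hq]; simp
    rw [hJ, hpad]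
    rfl
  · obtain ⟨hpne, hall⟩ := parts_good cs p (by rw [hq]; exact List.mem_cons_self)
    obtain ⟨x, xs, hx⟩ := List.exists_cons_of_ne_nil hpne
    have hxal : PySem.Chars.isalnum x = true := hall x (by rw [hx]; simp)
    have hJhead : Jn cs = x :: PySem.Chars.join ['-'] (xs :: ps) := by
      unfold Jn; rw [hq, hx, join_cons_head]
    have hxd : (x == '-') = false := alnum_ne_dash x hxal
    have hgood := parts_good cs
    rw [hq] at hgood
    obtain ⟨z, hz1, hz2⟩ : ∃ z, (Jn cs).getLast? = some z ∧ PySem.Chars.isalnum z = true := by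
      unfold Jn
      rw [hq]
      exact join_last hgood (by simp)
    have hzd : (z == '-') = false := alnum_ne_dash z hz2
    -- reverse of Jn cs starts with z
    obtain ⟨t, ht⟩ : ∃ t, (Jn cs).reverse = z :: t := by
      rcases hr : (Jn cs).reverse with _ | ⟨w, t⟩
      · rw [hJhead] at hr; simp at hr
      · have : (Jn cs).reverse.head? = some z := by rw [List.head?_reverse]; exact hz1
        rw [hr] at this; simp at this; subst this; exact ⟨t, rfl⟩
    have hdrop1 : List.dropWhile (fun c => ['-'].contains c) (Jn cs ++ padS cs)
        = Jn cs ++ padS cs := by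
      rw [hJhead, List.cons_append, List.dropWhile_cons, dash_contains, hxd]
      simp
    show (List.dropWhile (fun c => ['-'].contains c)
      (List.dropWhile (fun c => ['-'].contains c) (Jn cs ++ padS cs)).reverse).reverse = Jn cs
    rw [hdrop1, List.reverse_append]
    have hdrop2 : List.dropWhile (fun c => ['-'].contains c)
        ((padS cs).reverse ++ (Jn cs).reverse) = (Jn cs).reverse := by
      have hstop : List.dropWhile (fun c => ['-'].contains c) ((Jn cs).reverse)
          = (Jn cs).reverse := by
        rw [ht, List.dropWhile_cons, dash_contains, hzd]
        simp
      unfold padS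
      rw [hq]
      by_cases hl : lastNA cs = true
      · rw [if_neg (by simp), if_pos hl]
        have h1 : (['-'].contains '-') = true := by decide
        simp only [List.reverse_cons, List.reverse_nil, List.nil_append, List.cons_append,
          List.dropWhile_cons, h1, if_true]
        exact hstop
      · rw [if_neg (by simp), if_neg hl]
        simpa using hstop
    rw [hdrop2, List.reverse_reverse]

-- ===== VERDICT (by name: the statement is the Claim_ definition above) =====
theorem safe_slug_spec : Claim_equal_safe_slug := by
  intro value _
  unfold Spec_safe_slug safe_slug safe_slug_alt
  apply String.toList_inj.mp
  rw [PySem.Str.toList_stripChars, String.toList_ofList, String.toList_ofList]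
  have hfold : ((PySem.Str.lower value).toList.foldl stepA []) = Sf (PySem.Str.lower value).toList := by
    rw [foldl_eq_tailF]
    simp [Sf]
  rw [hfold, strip_final, String.toList_ofList]
  rfl
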